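-- pv_equiv track=rewrite | github.com/juhyeon3856/Algorithm | 프로그래머스/1/258712. 가장 많이 받은 선물/가장 많이 받은 선물.py | solution
-- ===== SOURCE A (Python) =====
-- def solution(friends, gifts):
--     person = {}
--     level = {}
--     for i in range(len(friends)):
--         person[friends[i]] = i
--         level[friends[i]] = 0
--     give = [[0]*len(friends) for _ in range(len(friends))]
--     for p in gifts:
--         p1, p2 = p.split()
--         give[person[p1]][person[p2]] += 1
--         level[p1] += 1
--         level[p2] -= 1
--     who = 'umm'
--     answer = 0
--     for i in range(len(friends)):
--         cnt = 0
--         for j in range(len(friends)):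
--             if give[i][j] > give[j][i]:
--                 cnt += 1
--             elif give[i][j] == give[j][i] and level[friends[i]] > level[friends[j]]:
--                 cnt += 1
--         if answer < cnt:
--             answer = cnt
--     return answer
-- ===== SOURCE B (Python) =====
-- def solution(friends, gifts):
--     person = {name: i for i, name in enumerate(friends)}
--     level = {name: 0 for name in friends}
--     net = {}  # unordered pair (min idx, max idx) -> (gifts min->max) - (gifts max->min)
--     for p in gifts:
--         a, b = p.split()
--         i, j = person[a], person[b]
--         level[a] += 1
--         level[b] -= 1
--         if i < j:
--             net[(i, j)] = net.get((i, j), 0) + 1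
--         elif j < i:
--             net[(j, i)] = net.get((j, i), 0) - 1
--     lv = [level[name] for name in friends]
--     rank = {}
--     for idx, v in enumerate(sorted(lv)):
--         if v not in rank:
--             rank[v] = idx
--     # default outcome of every pair is the level comparison: wins by rank
--     wins = [rank[v] for v in lv]
--     # correct only the pairs whose gift counts are unbalanced
--     for (i, j), d in net.items():
--         if d:
--             if lv[i] > lv[j]:
--                 wins[i] -= 1
--             elif lv[j] > lv[i]:
--                 wins[j] -= 1
--             wins[i if d > 0 else j] += 1
--     return max(wins, default=0)
-- ===== Notes on version B (the rewrite author's own statement) =====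
-- stated objective: alternative
-- what changed: A builds a full n x n gift matrix and recounts every person's wins against all n others in a quadratic double loop; B never builds the matrix: it keeps a sparse dict of the net gift balance per unordered pair, gets each person's default (level-tie) win count as the rank of their level in the sorted level list, and corrects only the pairs whose gift counts are unbalanced, returning max(wins, default=0).
import Mathlib
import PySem

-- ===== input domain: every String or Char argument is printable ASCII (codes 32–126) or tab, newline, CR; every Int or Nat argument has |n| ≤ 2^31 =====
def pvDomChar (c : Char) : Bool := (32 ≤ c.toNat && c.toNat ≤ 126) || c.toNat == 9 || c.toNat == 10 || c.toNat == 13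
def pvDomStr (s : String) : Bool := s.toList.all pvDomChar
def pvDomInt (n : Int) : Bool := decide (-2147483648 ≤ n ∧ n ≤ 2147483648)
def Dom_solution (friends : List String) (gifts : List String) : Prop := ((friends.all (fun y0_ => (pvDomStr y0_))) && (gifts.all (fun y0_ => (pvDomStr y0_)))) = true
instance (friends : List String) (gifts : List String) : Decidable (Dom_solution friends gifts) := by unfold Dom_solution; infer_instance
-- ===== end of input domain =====

-- B drops A's n×n give matrix and quadratic all-pairs recount: it keeps only a sparse dict of
-- net gift balance per unordered pair, gets each person's default (level-comparison) win count
-- from the rank of their level in the sorted level list, and corrects just the pairs whose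
-- gift counts are unbalanced; same return value wherever A returns.

-- ===== PORT A =====
-- person/level built in one indexed loop (A's first for-loop)
def initA (friends : List String) : PySem.Dict String Int × PySem.Dict String Int :=
  (PySem.List.pyRange 0 (PySem.List.len friends) 1).foldl
    (fun (pl : PySem.Dict String Int × PySem.Dict String Int) i =>
      (pl.1.insert (PySem.List.pyGetD friends i "") i,
       pl.2.insert (PySem.List.pyGetD friends i "") 0))
    (PySem.Dict.empty, PySem.Dict.empty)

-- the gifts loop: give[person[p1]][person[p2]] += 1; level[p1] += 1; level[p2] -= 1
-- (the guards `| _ => gl` are unreachable under Pre_solution: Python raises there)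
def giftFoldA (person : PySem.Dict String Int) (gifts : List String)
    (st : List (List Int) × PySem.Dict String Int) : List (List Int) × PySem.Dict String Int :=
  gifts.foldl
    (fun gl p =>
      match PySem.Str.split₀ p with
      | [p1, p2] =>
        match person.get? p1, person.get? p2 with
        | some i, some j =>
            (PySem.List.pySetD gl.1 i
               (PySem.List.pySetD (PySem.List.pyGetD gl.1 i []) j
                  (PySem.List.pyGetD (PySem.List.pyGetD gl.1 i []) j 0 + 1)),
             (gl.2.modify p1 0 (· + 1)).modify p2 0 (· - 1))
        | _, _ => gl
      | _ => gl)
    st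

-- A's final double loop: recompute cnt for every i over all j, keep the running max
def countA (friends : List String) (give : List (List Int)) (level : PySem.Dict String Int) : Int :=
  (PySem.List.pyRange 0 (PySem.List.len friends) 1).foldl
    (fun answer i =>
      let cnt := (PySem.List.pyRange 0 (PySem.List.len friends) 1).foldl
        (fun cnt j =>
          if PySem.List.pyGetD (PySem.List.pyGetD give i []) j 0 >
             PySem.List.pyGetD (PySem.List.pyGetD give j []) i 0 then cnt + 1
          else if PySem.List.pyGetD (PySem.List.pyGetD give i []) j 0 =
                  PySem.List.pyGetD (PySem.List.pyGetD give j []) i 0 ∧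
                  level.getD (PySem.List.pyGetD friends i "") 0 >
                  level.getD (PySem.List.pyGetD friends j "") 0 then cnt + 1
          else cnt) (0 : Int)
      if answer < cnt then cnt else answer) 0

def solutionGive (friends : List String) (gifts : List String) :
    List (List Int) × PySem.Dict String Int :=
  giftFoldA (initA friends).1 gifts
    (List.replicate friends.length (List.replicate friends.length (0 : Int)), (initA friends).2)

def solution (friends : List String) (gifts : List String) : Int :=
  countA friends (solutionGive friends gifts).1 (solutionGive friends gifts).2

-- ===== PORT B =====
-- person = {name: i for i, name in enumerate(friends)}
def personB (friends : List String) : PySem.Dict String Int :=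
  (PySem.List.enumerate friends).foldl
    (fun (d : PySem.Dict String Int) p => d.insert p.2 p.1) PySem.Dict.empty

-- level = {name: 0 for name in friends}
def levelB (friends : List String) : PySem.Dict String Int :=
  friends.foldl (fun (d : PySem.Dict String Int) name => d.insert name (0 : Int)) PySem.Dict.empty

-- Source B's gifts loop: level updates plus the sparse net dict keyed by the unordered pair
-- (the guards `| _ => st` are unreachable under Pre_solution: Python raises there)
def giftFoldB (person : PySem.Dict String Int) (gifts : List String)
    (st : PySem.Dict (Int × Int) Int × PySem.Dict String Int) :
    PySem.Dict (Int × Int) Int × PySem.Dict String Int :=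
  gifts.foldl
    (fun st p =>
      match PySem.Str.split₀ p with
      | [a, b] =>
        match person.get? a, person.get? b with
        | some i, some j =>
          let lvl := (st.2.modify a 0 (· + 1)).modify b 0 (· - 1)
          if i < j then (st.1.modify (i, j) 0 (· + 1), lvl)
          else if j < i then (st.1.modify (j, i) 0 (· - 1), lvl)
          else (st.1, lvl)
        | _, _ => st
      | _ => st)
    st

def stateB (friends : List String) (gifts : List String) :
    PySem.Dict (Int × Int) Int × PySem.Dict String Int :=
  giftFoldB (personB friends) gifts (PySem.Dict.empty, levelB friends)

-- lv = [level[name] for name in friends]  (getD is exact: every name in friends is a key of level)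
def lvB (friends : List String) (level : PySem.Dict String Int) : List Int :=
  friends.map (fun name => level.getD name 0)

-- rank = {}; for idx, v in enumerate(sorted(lv)): if v not in rank: rank[v] = idx
def rankB (s : List Int) : PySem.Dict Int Int :=
  (PySem.List.enumerate s).foldl
    (fun r p => if r.contains p.2 then r else r.insert p.2 p.1) PySem.Dict.empty

-- the body of Source B's correction loop over net.items()
def corrStep (lv : List Int) (wins : List Int) (q : (Int × Int) × Int) : List Int :=
  if q.2 ≠ 0 then
    let wins1 :=
      if PySem.List.pyGetD lv q.1.1 0 > PySem.List.pyGetD lv q.1.2 0 then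
        PySem.List.pySetD wins q.1.1 (PySem.List.pyGetD wins q.1.1 0 - 1)
      else if PySem.List.pyGetD lv q.1.2 0 > PySem.List.pyGetD lv q.1.1 0 then
        PySem.List.pySetD wins q.1.2 (PySem.List.pyGetD wins q.1.2 0 - 1)
      else wins
    let w := if q.2 > 0 then q.1.1 else q.1.2
    PySem.List.pySetD wins1 w (PySem.List.pyGetD wins1 w 0 + 1)
  else wins

def corrB (lv : List Int) (items : List ((Int × Int) × Int)) (wins : List Int) : List Int :=
  items.foldl (corrStep lv) wins

def solution_alt (friends : List String) (gifts : List String) : Int :=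
  let st := stateB friends gifts
  let lv := lvB friends st.2
  let rank := rankB (PySem.List.sorted lv (fun x => x) false)
  -- wins = [rank[v] for v in lv]  (getD exact: every v in lv is a key of rank)
  let wins := corrB lv st.1.items (lv.map (fun v => rank.getD v 0))
  PySem.List.maxD wins (fun x => x) 0

-- ===== PRECONDITION & SPEC =====
-- Pre_ excludes exactly the inputs on which Python A raises: a gift line that does not
-- split into exactly two tokens (ValueError on unpacking) or whose tokens are not in
-- friends (KeyError on person[...]).
def Pre_solution (friends : List String) (gifts : List String) : Prop :=
  ∀ p ∈ gifts, (PySem.Str.split₀ p).length = 2 ∧ ∀ q ∈ PySem.Str.split₀ p, q ∈ friends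
instance (friends : List String) (gifts : List String) : Decidable (Pre_solution friends gifts) := by
  unfold Pre_solution; infer_instance

def pvWitness_solution : List String × List String :=
  (["a", "b", "c"], ["a b", "b a", "a c"])

def Spec_solution (friends : List String) (gifts : List String) (out : Int) : Prop :=
  out = solution_alt friends gifts
instance (friends : List String) (gifts : List String) (out : Int) :
    Decidable (Spec_solution friends gifts out) := by unfold Spec_solution; infer_instance

-- ===== CLAIM (what is proved, stated in full; the proofs are below) =====
def Claim_equal_solution : Prop := ∀ (friends : List String) (gifts : List String), Dom_solution friends gifts → Pre_solution friends gifts → Spec_solution friends gifts (solution friends gifts)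

-- ===== LEMMAS AND PROOFS =====

-- matrix entries, level values, and A's "i beats j" test
def pvGv (give : List (List Int)) (i j : Int) : Int :=
  PySem.List.pyGetD (PySem.List.pyGetD give i []) j 0

def pvD (give : List (List Int)) (i j : Int) : Int := pvGv give i j - pvGv give j i

def pvP (friends : List String) (give : List (List Int)) (level : PySem.Dict String Int)
    (i j : Int) : Bool :=
  decide (pvGv give i j > pvGv give j i) ||
    (decide (pvGv give i j = pvGv give j i) &&
     decide (level.getD (PySem.List.pyGetD friends i "") 0 >
             level.getD (PySem.List.pyGetD friends j "") 0))

-- the same test read through the lv list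
def pvQ (give : List (List Int)) (lv : List Int) (i j : Int) : Bool :=
  decide (pvGv give i j > pvGv give j i) ||
    (decide (pvGv give i j = pvGv give j i) &&
     decide (PySem.List.pyGetD lv i 0 > PySem.List.pyGetD lv j 0))

-- per-item contribution of the correction loop to index k
def pvC (lv : List Int) (k : Int) (q : (Int × Int) × Int) : Int :=
  if q.2 ≠ 0 then
    (if q.1.1 = k ∧ PySem.List.pyGetD lv q.1.1 0 > PySem.List.pyGetD lv q.1.2 0 then -1 else 0) +
    (if q.1.2 = k ∧ PySem.List.pyGetD lv q.1.2 0 > PySem.List.pyGetD lv q.1.1 0 then -1 else 0) +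
    (if (if q.2 > 0 then q.1.1 else q.1.2) = k then 1 else 0)
  else 0

-- the per-j gap between "k beats j" and the level default "lv j < lv k"
def pvδ (give : List (List Int)) (lv : List Int) (k j : Int) : Int :=
  (if pvQ give lv k j then 1 else 0) -
  (if PySem.List.pyGetD lv j 0 < PySem.List.pyGetD lv k 0 then 1 else 0)

-- partner extraction from a net key
def pvPk (k : Int) (p : Int × Int) : Option Int :=
  if p.1 < p.2 then
    (if p.1 = k then some p.2 else if p.2 = k then some p.1 else none)
  else none

-- invariant of the gifts folds
def pvInv (n : ℕ) (give : List (List Int)) (net : PySem.Dict (Int × Int) Int) : Prop :=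
  give.length = n ∧ (∀ row ∈ give, row.length = n) ∧
  (∀ p ∈ net.keys, 0 ≤ p.1 ∧ p.1 < p.2 ∧ p.2 < (n : Int)) ∧ net.keys.Nodup ∧
  (∀ i j : Int, 0 ≤ i → i < j → j < (n : Int) → pvD give i j = net.getD (i, j) 0)

lemma pyGetD_pySetD_gen {α : Type} (c : List α) (w : Int) (v : α) (k : Int) (dflt : α)
    (hw0 : 0 ≤ w) (hw : w < (c.length : Int)) (hk0 : 0 ≤ k) :
    PySem.List.pyGetD (PySem.List.pySetD c w v) k dflt =
      if w = k then v else PySem.List.pyGetD c k dflt := by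
  lift w to ℕ using hw0 with wn
  lift k to ℕ using hk0 with kn
  have hw' : wn < c.length := by exact_mod_cast hw
  simp only [PySem.List.pySetD_natCast, PySem.List.pyGetD_natCast,
    List.getD_eq_getElem?_getD, List.getElem?_set, Nat.cast_inj]
  by_cases h : wn = kn
  · subst h; simp [hw']
  · simp [h]

lemma pyGetD_pySetD_int (c : List Int) (w v k : Int) (hw0 : 0 ≤ w) (hw : w < (c.length : Int))
    (hk0 : 0 ≤ k) :
    PySem.List.pyGetD (PySem.List.pySetD c w v) k 0 =
      if w = k then v else PySem.List.pyGetD c k 0 := by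
  lift w to ℕ using hw0 with wn
  lift k to ℕ using hk0 with kn
  have hw' : wn < c.length := by exact_mod_cast hw
  simp only [PySem.List.pySetD_natCast, PySem.List.pyGetD_natCast,
    List.getD_eq_getElem?_getD, List.getElem?_set, Nat.cast_inj]
  by_cases h : wn = kn
  · subst h; simp [hw']
  · simp [h]

lemma personB_get? (friends : List String) (a : String) (ha : a ∈ friends) :
    ∃ i : Int, (personB friends).get? a = some i ∧ 0 ≤ i ∧ i < (friends.length : Int) := by
  have aux_not : ∀ (xs : List String) (t : Int) (d : PySem.Dict String Int), a ∉ xs →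
      ((PySem.List.enumerate xs t).foldl
        (fun (d : PySem.Dict String Int) p => d.insert p.2 p.1) d).get? a = d.get? a := by
    intro xs
    induction xs with
    | nil => intro t d _; simp [PySem.List.enumerate_nil]
    | cons x xs ih =>
      intro t d hmem
      rw [PySem.List.enumerate_cons, List.foldl_cons]
      rw [ih (t + 1) _ (fun h => hmem (List.mem_cons_of_mem _ h))]
      exact PySem.Dict.get?_insert_of_ne _ _ (fun h => hmem (h ▸ List.mem_cons_self))
  have aux : ∀ (xs : List String) (t : Int) (d : PySem.Dict String Int), a ∈ xs →
      ∃ i : Int, ((PySem.List.enumerate xs t).foldl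
        (fun (d : PySem.Dict String Int) p => d.insert p.2 p.1) d).get? a = some i ∧
        t ≤ i ∧ i < t + xs.length := by
    intro xs
    induction xs with
    | nil => intro t d h; simp at h
    | cons x xs ih =>
      intro t d hmem
      rw [PySem.List.enumerate_cons, List.foldl_cons]
      by_cases hx : a ∈ xs
      · obtain ⟨i, hi, h1, h2⟩ := ih (t + 1) (d.insert x t) hx
        refine ⟨i, hi, by omega, ?_⟩
        simp only [List.length_cons]
        push_cast
        omega
      · have hax : a = x := by
          rcases List.mem_cons.mp hmem with h | h
          · exact h
          · exact absurd h hx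
        subst hax
        rw [aux_not xs (t + 1) _ hx, PySem.Dict.get?_insert_self]
        refine ⟨t, rfl, le_refl t, ?_⟩
        simp only [List.length_cons]
        push_cast
        omega
  obtain ⟨i, hi, h1, h2⟩ := aux friends 0 PySem.Dict.empty ha
  exact ⟨i, hi, h1, by simpa using h2⟩

lemma gv_set (give : List (List Int)) (n : ℕ) (h1 : give.length = n)
    (h2 : ∀ row ∈ give, row.length = n) (i j : Int)
    (hi : 0 ≤ i ∧ i < (n : Int)) (hj : 0 ≤ j ∧ j < (n : Int)) (i' j' : Int)
    (hi' : 0 ≤ i') (hj' : 0 ≤ j') :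
    pvGv (PySem.List.pySetD give i
        (PySem.List.pySetD (PySem.List.pyGetD give i []) j (pvGv give i j + 1))) i' j'
      = pvGv give i' j' + (if i' = i ∧ j' = j then 1 else 0) := by
  have hiN : 0 ≤ i ∧ i < (give.length : Int) := by rw [h1]; exact hi
  have hrow : (PySem.List.pyGetD give i []).length = n := by
    apply h2
    exact PySem.List.pyGetD_mem give [] (by constructor <;> omega)
  have hjrow : j < ((PySem.List.pyGetD give i []).length : Int) := by rw [hrow]; exact hj.2
  unfold pvGv
  rw [pyGetD_pySetD_gen give i _ i' [] hiN.1 hiN.2 hi']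
  by_cases hii : i = i'
  · subst hii
    rw [if_pos rfl]
    rw [pyGetD_pySetD_gen _ j _ j' 0 hj.1 hjrow hj']
    by_cases hjj : j = j'
    · subst hjj
      simp
    · have hne2 : ¬ (i = i ∧ j' = j) := fun h => hjj h.2.symm
      have hjj' : ¬ j' = j := fun h => hjj h.symm
      simp [hjj']
      exact fun h => absurd h hjj
  · rw [if_neg hii]
    have hne : ¬ (i' = i ∧ j' = j) := fun h => hii h.1.symm
    simp [hne]

lemma gv_set_shape (give : List (List Int)) (n : ℕ) (h1 : give.length = n)
    (h2 : ∀ row ∈ give, row.length = n) (i j : Int) (hi : 0 ≤ i ∧ i < (n : Int)) :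
    (PySem.List.pySetD give i
        (PySem.List.pySetD (PySem.List.pyGetD give i []) j (pvGv give i j + 1))).length = n ∧
    ∀ row ∈ PySem.List.pySetD give i
        (PySem.List.pySetD (PySem.List.pyGetD give i []) j (pvGv give i j + 1)),
      row.length = n := by
  have hiN : 0 ≤ i ∧ i < (give.length : Int) := by rw [h1]; exact hi
  have hrow : (PySem.List.pyGetD give i []).length = n := by
    apply h2
    exact PySem.List.pyGetD_mem give [] (by constructor <;> omega)
  constructor
  · rw [PySem.List.length_pySetD, h1]
  · intro row hmem
    rw [PySem.List.pySetD_of_nonneg _ _ hiN.1] at hmem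
    rcases List.mem_or_eq_of_mem_set hmem with h | h
    · exact h2 row h
    · rw [h, PySem.List.length_pySetD, hrow]

lemma pvGv_def (g : List (List Int)) (i j : Int) :
    PySem.List.pyGetD (PySem.List.pyGetD g i []) j 0 = pvGv g i j := rfl

lemma fold_inv (friends : List String) (gifts : List String)
    (hpre : ∀ p ∈ gifts, (PySem.Str.split₀ p).length = 2 ∧ ∀ q ∈ PySem.Str.split₀ p, q ∈ friends)
    (give : List (List Int)) (net : PySem.Dict (Int × Int) Int)
    (lA lB : PySem.Dict String Int) (hl : lA = lB) (hinv : pvInv friends.length give net) :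
    (giftFoldA (personB friends) gifts (give, lA)).2 =
      (giftFoldB (personB friends) gifts (net, lB)).2 ∧
    pvInv friends.length (giftFoldA (personB friends) gifts (give, lA)).1
      (giftFoldB (personB friends) gifts (net, lB)).1 := by
  revert hl hinv
  revert give net lA lB
  revert hpre
  induction gifts with
  | nil => intro _ give net lA lB hl hinv; exact ⟨hl, hinv⟩
  | cons p gs ih =>
    intro hpre give net lA lB hl hinv
    subst hl
    obtain ⟨hg1, hg2, hk, hnd, hrel⟩ := hinv
    obtain ⟨hp2, hpmem⟩ := hpre p List.mem_cons_self
    obtain ⟨a, b, hab⟩ := List.length_eq_two.mp hp2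
    obtain ⟨i, hia, hi0, hin⟩ := personB_get? friends a (hpmem a (by rw [hab]; simp))
    obtain ⟨j, hjb, hj0, hjn⟩ := personB_get? friends b (hpmem b (by rw [hab]; simp))
    have hpre' : ∀ p ∈ gs, (PySem.Str.split₀ p).length = 2 ∧
        ∀ q ∈ PySem.Str.split₀ p, q ∈ friends :=
      fun p hp => hpre p (List.mem_cons_of_mem _ hp)
    have hshape := gv_set_shape give friends.length hg1 hg2 i j ⟨hi0, hin⟩
    unfold giftFoldA giftFoldB
    rw [List.foldl_cons, List.foldl_cons]
    simp only [hab, hia, hjb, pvGv_def]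
    rcases lt_trichotomy i j with hlt | heq | hgt
    · rw [if_pos hlt]
      have hkeys : (net.modify (i, j) 0 (· + 1)).keys = net.keys ∨
          ((net.modify (i, j) 0 (· + 1)).keys = net.keys ++ [(i, j)] ∧ (i, j) ∉ net.keys) := by
        rw [PySem.Dict.keys_modify]
        by_cases hc : net.contains (i, j)
        · exact Or.inl (PySem.Dict.keys_insert_of_contains _ _ hc)
        · refine Or.inr ⟨PySem.Dict.keys_insert_of_not_contains _ _ (by simp [hc]), ?_⟩
          intro hmem
          exact absurd ((PySem.Dict.contains_iff_mem_keys _ _).mpr hmem) (by simp [hc])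
      refine ih hpre' _ _ _ _ rfl ⟨hshape.1, hshape.2, ?_, ?_, ?_⟩
      · intro q hq
        rcases hkeys with h | ⟨h, _⟩
        · exact hk q (h ▸ hq)
        · rw [h] at hq
          rcases List.mem_append.mp hq with h' | h'
          · exact hk q h'
          · rcases List.mem_singleton.mp h' with rfl
            exact ⟨hi0, hlt, hjn⟩
      · rcases hkeys with h | ⟨h, hnm⟩
        · rw [h]; exact hnd
        · rw [h]
          exact List.Nodup.append hnd (List.nodup_singleton _)
            (by simpa [List.disjoint_singleton] using hnm)
      · intro i' j' h0 hlt' hup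
        have hj'0 : 0 ≤ j' := by omega
        have hd' := hrel i' j' h0 hlt' hup
        unfold pvD at hd' ⊢
        rw [gv_set give friends.length hg1 hg2 i j ⟨hi0, hin⟩ ⟨hj0, hjn⟩ i' j' h0 hj'0,
            gv_set give friends.length hg1 hg2 i j ⟨hi0, hin⟩ ⟨hj0, hjn⟩ j' i' hj'0 h0,
            PySem.Dict.getD_modify]
        by_cases he : i' = i ∧ j' = j
        · obtain ⟨rfl, rfl⟩ := he
          rw [if_pos (show (i', j') = (i', j') from rfl),
              if_pos (show i' = i' ∧ j' = j' from ⟨rfl, rfl⟩),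
              if_neg (show ¬ (j' = i' ∧ i' = j') by omega)]
          omega
        · rw [if_neg he, if_neg (show ¬ (j' = i ∧ i' = j) by omega),
              if_neg (show ¬ ((i', j') = (i, j)) by simp only [Prod.mk.injEq]; exact he)]
          omega
    · rw [if_neg (show ¬ i < j by omega), if_neg (show ¬ j < i by omega)]
      refine ih hpre' _ _ _ _ rfl ⟨hshape.1, hshape.2, hk, hnd, ?_⟩
      intro i' j' h0 hlt' hup
      have hj'0 : 0 ≤ j' := by omega
      have hd' := hrel i' j' h0 hlt' hup
      unfold pvD at hd' ⊢
      rw [gv_set give friends.length hg1 hg2 i j ⟨hi0, hin⟩ ⟨hj0, hjn⟩ i' j' h0 hj'0,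
          gv_set give friends.length hg1 hg2 i j ⟨hi0, hin⟩ ⟨hj0, hjn⟩ j' i' hj'0 h0,
          if_neg (show ¬ (i' = i ∧ j' = j) by omega),
          if_neg (show ¬ (j' = i ∧ i' = j) by omega)]
      omega
    · rw [if_neg (by omega), if_pos hgt]
      have hkeys : (net.modify (j, i) 0 (· - 1)).keys = net.keys ∨
          ((net.modify (j, i) 0 (· - 1)).keys = net.keys ++ [(j, i)] ∧ (j, i) ∉ net.keys) := by
        rw [PySem.Dict.keys_modify]
        by_cases hc : net.contains (j, i)
        · exact Or.inl (PySem.Dict.keys_insert_of_contains _ _ hc)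
        · refine Or.inr ⟨PySem.Dict.keys_insert_of_not_contains _ _ (by simp [hc]), ?_⟩
          intro hmem
          exact absurd ((PySem.Dict.contains_iff_mem_keys _ _).mpr hmem) (by simp [hc])
      refine ih hpre' _ _ _ _ rfl ⟨hshape.1, hshape.2, ?_, ?_, ?_⟩
      · intro q hq
        rcases hkeys with h | ⟨h, _⟩
        · exact hk q (h ▸ hq)
        · rw [h] at hq
          rcases List.mem_append.mp hq with h' | h'
          · exact hk q h'
          · rcases List.mem_singleton.mp h' with rfl
            exact ⟨hj0, hgt, hin⟩
      · rcases hkeys with h | ⟨h, hnm⟩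
        · rw [h]; exact hnd
        · rw [h]
          exact List.Nodup.append hnd (List.nodup_singleton _)
            (by simpa [List.disjoint_singleton] using hnm)
      · intro i' j' h0 hlt' hup
        have hj'0 : 0 ≤ j' := by omega
        have hd' := hrel i' j' h0 hlt' hup
        unfold pvD at hd' ⊢
        rw [gv_set give friends.length hg1 hg2 i j ⟨hi0, hin⟩ ⟨hj0, hjn⟩ i' j' h0 hj'0,
            gv_set give friends.length hg1 hg2 i j ⟨hi0, hin⟩ ⟨hj0, hjn⟩ j' i' hj'0 h0,
            PySem.Dict.getD_modify]
        by_cases he : j' = i ∧ i' = j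
        · obtain ⟨rfl, rfl⟩ := he
          rw [if_pos (show (i', j') = (i', j') from rfl),
              if_neg (show ¬ (i' = j' ∧ j' = i') by omega),
              if_pos (show j' = j' ∧ i' = i' from ⟨rfl, rfl⟩)]
          omega
        · rw [if_neg (show ¬ (i' = i ∧ j' = j) by omega), if_neg he,
              if_neg (show ¬ ((i', j') = (j, i)) by simp only [Prod.mk.injEq]; omega)]
          omega

-- rank dict lemmas
lemma rank_fold_preserve (s : List Int) (v w : Int) :
    ∀ (t : Int) (d : PySem.Dict Int Int), d.get? v = some w →
    ((PySem.List.enumerate s t).foldl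
        (fun r p => if r.contains p.2 then r else r.insert p.2 p.1) d).get? v = some w := by
  induction s with
  | nil => intro t d h; simpa [PySem.List.enumerate_nil] using h
  | cons x xs ih =>
    intro t d h
    rw [PySem.List.enumerate_cons, List.foldl_cons]
    apply ih
    dsimp only
    by_cases hc : d.contains x
    · rw [if_pos hc]; exact h
    · rw [if_neg hc]
      by_cases hxv : x = v
      · subst hxv
        rw [PySem.Dict.contains_eq_isSome_get?, h] at hc
        simp at hc
      · rw [PySem.Dict.get?_insert_of_ne _ _ (Ne.symm hxv)]
        exact h

lemma rank_fold_get? (s : List Int) (v : Int) :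
    ∀ (t : Int) (d : PySem.Dict Int Int), d.contains v = false → v ∈ s →
    ((PySem.List.enumerate s t).foldl
        (fun r p => if r.contains p.2 then r else r.insert p.2 p.1) d).get? v =
      some (t + (s.idxOf v : Int)) := by
  induction s with
  | nil => intro t d _ h; simp at h
  | cons x xs ih =>
    intro t d hnc hmem
    rw [PySem.List.enumerate_cons, List.foldl_cons]
    by_cases hxv : x = v
    · subst hxv
      dsimp only
      rw [if_neg (by simp [hnc])]
      have hpres := rank_fold_preserve xs x t (t + 1) (d.insert x t)
        (PySem.Dict.get?_insert_self d x t)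
      rw [hpres, List.idxOf_cons_self]
      simp
    · have hv : v ∈ xs := by
        rcases List.mem_cons.mp hmem with h | h
        · exact absurd h.symm hxv
        · exact h
      dsimp only
      have step_nc : ((if d.contains x then d else d.insert x t)).contains v = false := by
        split_ifs
        · exact hnc
        · rw [PySem.Dict.contains_insert]
          simp [hnc, (by simp [Ne.symm hxv] : (v == x) = false)]
      rw [ih (t + 1) _ step_nc hv, List.idxOf_cons_ne _ hxv]
      congr 1
      push_cast [Nat.succ_eq_add_one]
      ring

lemma rank_getD (s : List Int) (v : Int) (hv : v ∈ s) :
    (rankB s).getD v 0 = (s.idxOf v : Int) := by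
  unfold rankB
  have h := rank_fold_get? s v 0 PySem.Dict.empty (by simp) hv
  rw [PySem.Dict.getD_of_get?_eq_some _ _ h]
  simp

lemma idxOf_sorted (s : List Int) (hs : s.Pairwise (· ≤ ·)) (v : Int) (hv : v ∈ s) :
    (s.idxOf v : Int) = (s.countP (fun x => decide (x < v)) : Int) := by
  induction s with
  | nil => simp at hv
  | cons x t ih =>
    obtain ⟨h1, h2⟩ := List.pairwise_cons.mp hs
    by_cases hxv : x = v
    · subst hxv
      rw [List.idxOf_cons_self]
      have hz : t.countP (fun y => decide (y < x)) = 0 := by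
        rw [List.countP_eq_zero]
        intro y hy
        simp only [decide_eq_true_eq]
        exact not_lt.mpr (h1 y hy)
      simp [hz]
    · have hv' : v ∈ t := by
        rcases List.mem_cons.mp hv with h | h
        · exact absurd h.symm hxv
        · exact h
      have hxltv : x < v := lt_of_le_of_ne (h1 v hv') hxv
      rw [List.idxOf_cons_ne _ hxv, List.countP_cons]
      simp only [decide_eq_true_eq, hxltv, if_pos, Nat.succ_eq_add_one]
      push_cast
      rw [ih h2 hv']

-- correction loop accounting
lemma pyAdj_add1 (c : List Int) (w k : Int) (hw0 : 0 ≤ w) (hw : w < (c.length : Int))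
    (hk0 : 0 ≤ k) :
    PySem.List.pyGetD (PySem.List.pySetD c w (PySem.List.pyGetD c w 0 + 1)) k 0 =
      PySem.List.pyGetD c k 0 + (if w = k then 1 else 0) := by
  rw [pyGetD_pySetD_int c w _ k hw0 hw hk0]
  split_ifs with h
  · rw [h]
  · omega

lemma pyAdj_sub1 (c : List Int) (w k : Int) (hw0 : 0 ≤ w) (hw : w < (c.length : Int))
    (hk0 : 0 ≤ k) :
    PySem.List.pyGetD (PySem.List.pySetD c w (PySem.List.pyGetD c w 0 - 1)) k 0 =
      PySem.List.pyGetD c k 0 + (if w = k then -1 else 0) := by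
  rw [pyGetD_pySetD_int c w _ k hw0 hw hk0]
  split_ifs with h
  · rw [h]; omega
  · omega

lemma corrStep_length (lv wins : List Int) (q : (Int × Int) × Int) :
    (corrStep lv wins q).length = wins.length := by
  unfold corrStep
  split_ifs <;> simp [PySem.List.length_pySetD]

lemma corrStep_getD (lv wins : List Int) (q : (Int × Int) × Int)
    (hq : 0 ≤ q.1.1 ∧ q.1.1 < q.1.2 ∧ q.1.2 < (wins.length : Int)) (k : Int) (hk0 : 0 ≤ k) :
    PySem.List.pyGetD (corrStep lv wins q) k 0 =
      PySem.List.pyGetD wins k 0 + pvC lv k q := by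
  obtain ⟨hi0, hij, hjlen⟩ := hq
  have hj0 : 0 ≤ q.1.2 := by omega
  have hilen : q.1.1 < (wins.length : Int) := by omega
  unfold corrStep pvC
  by_cases hd : q.2 ≠ 0
  · rw [if_pos hd, if_pos hd]
    dsimp only
    by_cases hpos : q.2 > 0
    · rw [if_pos hpos]
      by_cases h1 : PySem.List.pyGetD lv q.1.1 0 > PySem.List.pyGetD lv q.1.2 0
      · have h2 : ¬ (PySem.List.pyGetD lv q.1.2 0 > PySem.List.pyGetD lv q.1.1 0) := by omega
        rw [if_pos h1,
          pyAdj_add1 _ q.1.1 k hi0 (by rw [PySem.List.length_pySetD]; exact hilen) hk0,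
          pyAdj_sub1 _ q.1.1 k hi0 hilen hk0]
        split_ifs <;> omega
      · rw [if_neg h1]
        by_cases h2 : PySem.List.pyGetD lv q.1.2 0 > PySem.List.pyGetD lv q.1.1 0
        · rw [if_pos h2,
            pyAdj_add1 _ q.1.1 k hi0 (by rw [PySem.List.length_pySetD]; exact hilen) hk0,
            pyAdj_sub1 _ q.1.2 k hj0 hjlen hk0]
          split_ifs <;> omega
        · rw [if_neg h2, pyAdj_add1 _ q.1.1 k hi0 hilen hk0]
          split_ifs <;> omega
    · rw [if_neg hpos]
      by_cases h1 : PySem.List.pyGetD lv q.1.1 0 > PySem.List.pyGetD lv q.1.2 0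
      · have h2 : ¬ (PySem.List.pyGetD lv q.1.2 0 > PySem.List.pyGetD lv q.1.1 0) := by omega
        rw [if_pos h1,
          pyAdj_add1 _ q.1.2 k hj0 (by rw [PySem.List.length_pySetD]; exact hjlen) hk0,
          pyAdj_sub1 _ q.1.1 k hi0 hilen hk0]
        split_ifs <;> omega
      · rw [if_neg h1]
        by_cases h2 : PySem.List.pyGetD lv q.1.2 0 > PySem.List.pyGetD lv q.1.1 0
        · rw [if_pos h2,
            pyAdj_add1 _ q.1.2 k hj0 (by rw [PySem.List.length_pySetD]; exact hjlen) hk0,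
            pyAdj_sub1 _ q.1.2 k hj0 hjlen hk0]
          split_ifs <;> omega
        · rw [if_neg h2, pyAdj_add1 _ q.1.2 k hj0 hjlen hk0]
          split_ifs <;> omega
  · rw [if_neg hd, if_neg hd]
    omega

lemma corrB_length (lv : List Int) (items : List ((Int × Int) × Int)) (wins : List Int) :
    (corrB lv items wins).length = wins.length := by
  unfold corrB
  induction items generalizing wins with
  | nil => rfl
  | cons q t ih => simpa [List.foldl_cons, corrStep_length] using
      (ih (corrStep lv wins q)).trans (corrStep_length lv wins q)

lemma corrB_getD (lv : List Int) (items : List ((Int × Int) × Int)) (wins : List Int)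
    (hb : ∀ q ∈ items, 0 ≤ q.1.1 ∧ q.1.1 < q.1.2 ∧ q.1.2 < (wins.length : Int))
    (k : Int) (hk0 : 0 ≤ k) :
    PySem.List.pyGetD (corrB lv items wins) k 0 =
      PySem.List.pyGetD wins k 0 + (items.map (pvC lv k)).sum := by
  unfold corrB
  revert hb
  induction items generalizing wins with
  | nil => intro _; simp
  | cons q t ih =>
    intro hb
    rw [List.foldl_cons, List.map_cons, List.sum_cons]
    rw [ih (corrStep lv wins q)
        (fun r hr => by simpa [corrStep_length] using hb r (List.mem_cons_of_mem _ hr))]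
    rw [corrStep_getD lv wins q (hb q (by simp)) k hk0]
    ring

-- sum helpers
lemma sum_map_sub_int {α : Type} (l : List α) (f g : α → Int) :
    (l.map (fun x => f x - g x)).sum = (l.map f).sum - (l.map g).sum := by
  induction l with
  | nil => simp
  | cons x t ih => simp only [List.map_cons, List.sum_cons, ih]; ring

lemma sum_map_elim {α : Type} (l : List α) (f : α → Int) (pf : α → Option Int) (g : Int → Int)
    (h : ∀ q ∈ l, f q = (pf q).elim 0 g) :
    (l.map f).sum = ((l.filterMap pf).map g).sum := by
  induction l with
  | nil => simp
  | cons x t ih =>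
    have hx := h x (by simp)
    cases hpf : pf x with
    | none =>
      simp only [List.map_cons, List.sum_cons, List.filterMap_cons, hpf]
      rw [ih (fun q hq => h q (by simp [hq]))]
      simp [hx, hpf]
    | some m =>
      simp only [List.map_cons, List.sum_cons, List.filterMap_cons, hpf]
      rw [ih (fun q hq => h q (by simp [hq]))]
      simp [hx, hpf]

lemma sum_map_eq_sum_filter {α : Type} (l : List α) (p : α → Bool) (f : α → Int)
    (h : ∀ x ∈ l, p x = false → f x = 0) :
    (l.map f).sum = ((l.filter p).map f).sum := by
  induction l with
  | nil => simp
  | cons x t ih =>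
    have ih' := ih (fun y hy => h y (by simp [hy]))
    cases hx : p x with
    | false => simp [hx, h x (by simp) hx, ih']
    | true => simp [hx, ih']

lemma pvδ_zero (give : List (List Int)) (lv : List Int) (k j : Int)
    (h : pvD give k j = 0) : pvδ give lv k j = 0 := by
  unfold pvD at h
  unfold pvδ pvQ
  have e1 : decide (pvGv give k j > pvGv give j k) = false := by
    simp only [decide_eq_false_iff_not]; omega
  have e2 : decide (pvGv give k j = pvGv give j k) = true := by
    simp only [decide_eq_true_eq]; omega
  rw [e1, e2]
  simp only [Bool.false_or, Bool.true_and, decide_eq_true_eq]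
  split_ifs <;> omega

lemma pvPk_some (k : Int) (p : Int × Int) (m : Int) (h : pvPk k p = some m) :
    p.1 < p.2 ∧ ((p.1 = k ∧ p.2 = m) ∨ (p.2 = k ∧ p.1 = m)) := by
  unfold pvPk at h
  split_ifs at h with h1 h2 h3 <;> simp_all

lemma pvC_elim (give : List (List Int)) (lv : List Int) (k i j d : Int)
    (hij : i < j) (hd : d = pvD give i j) :
    pvC lv k ((i, j), d) = (pvPk k (i, j)).elim 0 (pvδ give lv k) := by
  unfold pvD at hd
  unfold pvC pvPk
  rw [if_pos hij]
  by_cases hik : i = k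
  · subst hik
    rw [if_pos rfl]
    simp only [Option.elim_some]
    by_cases hdz : d ≠ 0
    · rw [if_pos hdz]
      unfold pvδ pvQ
      simp only [Bool.or_eq_true, Bool.and_eq_true, decide_eq_true_eq, true_and]
      split_ifs <;> omega
    · rw [if_neg hdz]
      rw [pvδ_zero give lv i j (by unfold pvD; omega)]
  · rw [if_neg hik]
    by_cases hjk : j = k
    · subst hjk
      rw [if_pos rfl]
      simp only [Option.elim_some]
      by_cases hdz : d ≠ 0
      · rw [if_pos hdz]
        unfold pvδ pvQ
        simp only [Bool.or_eq_true, Bool.and_eq_true, decide_eq_true_eq, true_and]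
        split_ifs <;> omega
      · rw [if_neg hdz]
        rw [pvδ_zero give lv j i (by unfold pvD; omega)]
    · rw [if_neg hjk]
      simp only [Option.elim_none]
      split_ifs <;> omega

-- the crux: the corrections add exactly the gap between the gift test and the level default
lemma sum_C_eq (n : ℕ) (give : List (List Int)) (net : PySem.Dict (Int × Int) Int)
    (lv : List Int) (hinv : pvInv n give net) (k : Int) (hk : 0 ≤ k ∧ k < (n : Int)) :
    (net.items.map (pvC lv k)).sum =
      ((PySem.List.pyRange 0 (n : Int) 1).map (pvδ give lv k)).sum := by
  obtain ⟨hg1, hg2, hkb, hnd, hrel⟩ := hinv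
  have h1 : (net.items.map (pvC lv k)).sum =
      ((net.items.filterMap (fun q => pvPk k q.1)).map (pvδ give lv k)).sum := by
    apply sum_map_elim
    intro q hq
    have hkey : q.1 ∈ net.keys := PySem.Dict.mem_keys_of_mem_items net hq
    obtain ⟨hq0, hqlt, hqn⟩ := hkb q.1 hkey
    have hval : q.2 = net.getD q.1 0 := (PySem.Dict.getD_of_mem_items net hq hnd 0).symm
    have hdd : q.2 = pvD give q.1.1 q.1.2 := by
      rw [hval, hrel q.1.1 q.1.2 hq0 hqlt hqn]
    simpa using pvC_elim give lv k q.1.1 q.1.2 q.2 hqlt hdd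
  have h2 : net.items.filterMap (fun q => pvPk k q.1) = net.keys.filterMap (pvPk k) := by
    show _ = (net.items.map (·.1)).filterMap (pvPk k)
    rw [List.filterMap_map]
    rfl
  have hndPL : (net.keys.filterMap (pvPk k)).Nodup := by
    refine List.Nodup.filterMap ?_ hnd
    intro a a' b hb hb'
    have c1 := pvPk_some k a b (Option.mem_def.mp hb)
    have c2 := pvPk_some k a' b (Option.mem_def.mp hb')
    have hl1 := c1.1
    have hl2 := c2.1
    rcases c1.2 with ⟨e1, e2⟩ | ⟨e1, e2⟩ <;> rcases c2.2 with ⟨e3, e4⟩ | ⟨e3, e4⟩ <;>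
      (rw [Prod.ext_iff]; constructor <;> omega)
  have hmemPL : ∀ m : Int, m ∈ net.keys.filterMap (pvPk k) ↔
      ∃ p ∈ net.keys, pvPk k p = some m := by
    intro m; simp [List.mem_filterMap]
  have hPLb : ∀ m ∈ net.keys.filterMap (pvPk k), m ∈ PySem.List.pyRange 0 (n : Int) 1 := by
    intro m hm
    obtain ⟨p, hp, hpk⟩ := (hmemPL m).mp hm
    obtain ⟨h0, hlt, hup⟩ := hkb p hp
    obtain ⟨_, hc⟩ := pvPk_some k p m hpk
    apply PySem.List.mem_pyRange_one.mpr
    rcases hc with ⟨_, e⟩ | ⟨_, e⟩ <;> constructor <;> omega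
  have hzero : ∀ j ∈ PySem.List.pyRange 0 (n : Int) 1,
      (decide (j ∈ net.keys.filterMap (pvPk k)) = false) → pvδ give lv k j = 0 := by
    intro j hj hnin
    obtain ⟨hj0, hjn⟩ := PySem.List.mem_pyRange_one.mp hj
    rw [decide_eq_false_iff_not] at hnin
    apply pvδ_zero
    by_cases hjk : j = k
    · subst hjk
      unfold pvD
      omega
    · rcases lt_trichotomy k j with hkj | he | hjk2
      · have hnc : net.contains (k, j) = false := by
          by_contra hc
          apply hnin
          apply (hmemPL j).mpr
          refine ⟨(k, j), ?_, ?_⟩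
          · exact (PySem.Dict.contains_iff_mem_keys net (k, j)).mp
              (by revert hc; cases net.contains (k, j) <;> simp)
          · unfold pvPk
            rw [if_pos hkj, if_pos rfl]
        have hr := hrel k j hk.1 hkj hjn
        rw [PySem.Dict.getD_of_not_contains net 0 hnc] at hr
        exact hr
      · exact absurd he.symm hjk
      · have hnc : net.contains (j, k) = false := by
          by_contra hc
          apply hnin
          apply (hmemPL j).mpr
          refine ⟨(j, k), ?_, ?_⟩
          · exact (PySem.Dict.contains_iff_mem_keys net (j, k)).mp
              (by revert hc; cases net.contains (j, k) <;> simp)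
          · unfold pvPk
            rw [if_pos hjk2, if_neg (by simpa using hjk), if_pos rfl]
        have hr := hrel j k hj0 hjk2 hk.2
        rw [PySem.Dict.getD_of_not_contains net 0 hnc] at hr
        unfold pvD at hr ⊢
        omega
  have hperm : ((PySem.List.pyRange 0 (n : Int) 1).filter
      (fun j => decide (j ∈ net.keys.filterMap (pvPk k)))).Perm (net.keys.filterMap (pvPk k)) := by
    rw [List.perm_ext_iff_of_nodup
      (List.Nodup.filter _ (PySem.List.nodup_pyRange_one _ _)) hndPL]
    intro m
    simp only [List.mem_filter, decide_eq_true_eq]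
    exact ⟨fun h => h.2, fun h => ⟨hPLb m h, h⟩⟩
  rw [h1, h2, sum_map_eq_sum_filter _ _ _ hzero]
  exact ((hperm.map (pvδ give lv k)).sum_eq).symm

-- A's outer loop is a running max of per-index counts
lemma countA_eq (friends : List String) (give : List (List Int)) (level : PySem.Dict String Int) :
    countA friends give level =
      ((List.range friends.length).map
        (fun kn : ℕ => ((PySem.List.pyRange 0 (friends.length : Int) 1).countP
          (fun j => pvP friends give level (kn : Int) j) : Int))).foldl max 0 := by
  unfold countA
  rw [PySem.List.len_eq]
  have hinner : ∀ i : Int, (PySem.List.pyRange 0 (friends.length : Int) 1).foldl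
      (fun cnt j =>
        if PySem.List.pyGetD (PySem.List.pyGetD give i []) j 0 >
           PySem.List.pyGetD (PySem.List.pyGetD give j []) i 0 then cnt + 1
        else if PySem.List.pyGetD (PySem.List.pyGetD give i []) j 0 =
                PySem.List.pyGetD (PySem.List.pyGetD give j []) i 0 ∧
                level.getD (PySem.List.pyGetD friends i "") 0 >
                level.getD (PySem.List.pyGetD friends j "") 0 then cnt + 1
        else cnt) (0 : Int) =
      ((PySem.List.pyRange 0 (friends.length : Int) 1).countP
        (fun j => pvP friends give level i j) : Int) := by
    intro i
    have e1 : (PySem.List.pyRange 0 (friends.length : Int) 1).foldl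
        (fun cnt j =>
          if PySem.List.pyGetD (PySem.List.pyGetD give i []) j 0 >
             PySem.List.pyGetD (PySem.List.pyGetD give j []) i 0 then cnt + 1
          else if PySem.List.pyGetD (PySem.List.pyGetD give i []) j 0 =
                  PySem.List.pyGetD (PySem.List.pyGetD give j []) i 0 ∧
                  level.getD (PySem.List.pyGetD friends i "") 0 >
                  level.getD (PySem.List.pyGetD friends j "") 0 then cnt + 1
          else cnt) (0 : Int) =
        (PySem.List.pyRange 0 (friends.length : Int) 1).foldl
          (fun cnt j => if pvP friends give level i j = true then cnt + 1 else cnt) (0 : Int) :=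
      PySem.List.foldl_congr_mem _ _ _ _ (by
        intro c j _
        by_cases h1 : PySem.List.pyGetD (PySem.List.pyGetD give i []) j 0 >
            PySem.List.pyGetD (PySem.List.pyGetD give j []) i 0
        · simp [h1, pvP, pvGv]
        · by_cases h2 : PySem.List.pyGetD (PySem.List.pyGetD give i []) j 0 =
              PySem.List.pyGetD (PySem.List.pyGetD give j []) i 0 ∧
              level.getD (PySem.List.pyGetD friends i "") 0 >
              level.getD (PySem.List.pyGetD friends j "") 0
          · simp [h2.1, h2.2, pvP, pvGv]
          · rw [if_neg h1, if_neg h2]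
            have hfalse : pvP friends give level i j = false := by
              simp only [pvP, pvGv, Bool.or_eq_false_iff,
                Bool.and_eq_false_iff, decide_eq_false_iff_not]
              rcases not_and_or.mp h2 with h3 | h3
              · exact ⟨h1, Or.inl h3⟩
              · exact ⟨h1, Or.inr h3⟩
            simp [hfalse])
    have e2 := PySem.List.foldl_ite_add_one
      (l := PySem.List.pyRange 0 (friends.length : Int) 1)
      (fun j => pvP friends give level i j = true) (0 : Int)
    rw [e1, e2]
    simp
  have e3 : (PySem.List.pyRange 0 (friends.length : Int) 1).foldl
      (fun answer i =>
        let cnt := (PySem.List.pyRange 0 (friends.length : Int) 1).foldl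
          (fun cnt j =>
            if PySem.List.pyGetD (PySem.List.pyGetD give i []) j 0 >
               PySem.List.pyGetD (PySem.List.pyGetD give j []) i 0 then cnt + 1
            else if PySem.List.pyGetD (PySem.List.pyGetD give i []) j 0 =
                    PySem.List.pyGetD (PySem.List.pyGetD give j []) i 0 ∧
                    level.getD (PySem.List.pyGetD friends i "") 0 >
                    level.getD (PySem.List.pyGetD friends j "") 0 then cnt + 1
            else cnt) (0 : Int)
        if answer < cnt then cnt else answer) 0 =
      (PySem.List.pyRange 0 (friends.length : Int) 1).foldl
        (fun acc i => max acc (((PySem.List.pyRange 0 (friends.length : Int) 1).countP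
          (fun j => pvP friends give level i j) : Int))) 0 := by
    apply PySem.List.foldl_congr_mem
    intro acc i _
    simp only [hinner i]
    rcases le_total acc (((PySem.List.pyRange 0 (friends.length : Int) 1).countP
        (fun j => pvP friends give level i j) : Int)) with h | h
    · rw [max_eq_right h]; split_ifs <;> omega
    · rw [max_eq_left h]; split_ifs <;> omega
  rw [e3, PySem.List.pyRange_one, List.foldl_map, List.foldl_map]
  simp only [Int.sub_zero, Int.toNat_natCast, zero_add]


lemma maxD_nonneg (l : List Int) (h : ∀ x ∈ l, 0 ≤ x) :
    PySem.List.maxD l (fun x => x) 0 = l.foldl max 0 := by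
  cases l with
  | nil => rfl
  | cons x t =>
    unfold PySem.List.maxD
    rw [PySem.List.max?_id_cons]
    simp only [Option.getD_some, List.foldl_cons]
    rw [max_eq_right (h x (by simp))]

lemma initA_eq (friends : List String) :
    initA friends = (personB friends, levelB friends) := by
  unfold initA personB levelB
  rw [PySem.List.foldl_prod_mk
      (f := fun (d : PySem.Dict String Int) i => d.insert (PySem.List.pyGetD friends i "") i)
      (g := fun (d : PySem.Dict String Int) i => d.insert (PySem.List.pyGetD friends i "") 0)]
  refine Prod.ext ?_ ?_
  · rw [PySem.List.enumerate_eq_map_pyRange friends "", List.foldl_map]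
  · exact PySem.List.foldl_pyRange_zero_pyGetD friends ""
      (fun (d : PySem.Dict String Int) name => d.insert name 0) _

lemma pyGetD_zero_of_all (r : List Int) (b : Int) (h : ∀ x ∈ r, x = (0 : Int)) :
    PySem.List.pyGetD r b 0 = 0 := by
  by_cases hr : PySem.Raise.InRange r.length b
  · exact h _ (PySem.List.pyGetD_mem r 0 hr)
  · exact PySem.List.pyGetD_of_none r b 0 ((PySem.List.pyGet?_eq_none_iff r b).mpr hr)

lemma pyGetD_map_nat (l : List Int) (f : Int → Int) (kn : ℕ) (h : kn < l.length) :
    PySem.List.pyGetD (l.map f) (kn : Int) 0 = f l[kn] := by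
  rw [PySem.List.pyGetD_natCast, List.getD_eq_getElem?_getD, List.getElem?_map,
      List.getElem?_eq_getElem h]
  rfl

lemma lv_bridge (friends : List String) (level : PySem.Dict String Int) (kn : ℕ)
    (h : kn < friends.length) :
    PySem.List.pyGetD (lvB friends level) (kn : Int) 0 =
      level.getD (PySem.List.pyGetD friends (kn : Int) "") 0 := by
  unfold lvB
  rw [PySem.List.pyGetD_natCast, PySem.List.pyGetD_natCast,
      List.getD_eq_getElem?_getD, List.getElem?_map, List.getElem?_eq_getElem h,
      List.getD_eq_getElem friends "" h]
  rfl

lemma main_eq (friends gifts : List String)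
    (hpre : ∀ p ∈ gifts, (PySem.Str.split₀ p).length = 2 ∧ ∀ q ∈ PySem.Str.split₀ p, q ∈ friends) :
    solution friends gifts = solution_alt friends gifts := by
  have hinit := initA_eq friends
  have hz : ∀ a b : Int,
      pvGv (List.replicate friends.length (List.replicate friends.length (0 : Int))) a b = 0 := by
    intro a b
    unfold pvGv
    apply pyGetD_zero_of_all
    intro x hx
    by_cases hr : PySem.Raise.InRange
        (List.replicate friends.length (List.replicate friends.length (0 : Int))).length a
    · have hmem := PySem.List.pyGetD_mem
        (List.replicate friends.length (List.replicate friends.length (0 : Int)))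
        ([] : List Int) hr
      rw [List.eq_of_mem_replicate hmem] at hx
      exact List.eq_of_mem_replicate hx
    · rw [PySem.List.pyGetD_of_none _ _ _ ((PySem.List.pyGet?_eq_none_iff _ _).mpr hr)] at hx
      simp at hx
  have hinv0 : pvInv friends.length
      (List.replicate friends.length (List.replicate friends.length (0 : Int)))
      PySem.Dict.empty := by
    refine ⟨by simp, ?_, ?_, ?_, ?_⟩
    · intro row hr; rw [List.eq_of_mem_replicate hr]; simp
    · intro p hp; rw [PySem.Dict.keys_empty] at hp; simp at hp
    · rw [PySem.Dict.keys_empty]; exact List.nodup_nil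
    · intro i j h0 hlt hup
      unfold pvD
      rw [hz, hz, PySem.Dict.getD_empty]
      ring
  obtain ⟨hlvl, hinv⟩ := fold_inv friends gifts hpre
    (List.replicate friends.length (List.replicate friends.length (0 : Int)))
    PySem.Dict.empty (levelB friends) (levelB friends) rfl hinv0
  set GA := giftFoldA (personB friends) gifts
    (List.replicate friends.length (List.replicate friends.length (0 : Int)), levelB friends)
    with hGA
  set GB := giftFoldB (personB friends) gifts (PySem.Dict.empty, levelB friends) with hGB
  obtain ⟨hg1, hg2, hkb, hnd, hrel⟩ := hinv
  have hsolA : solution friends gifts = countA friends GA.1 GA.2 := by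
    unfold solution solutionGive
    rw [hinit]
  set lv := lvB friends GB.2 with hlv
  have hlvlen : lv.length = friends.length := by rw [hlv]; unfold lvB; rw [List.length_map]
  set rnk := rankB (PySem.List.sorted lv (fun x => x) false) with hrnk
  set wins0 := lv.map (fun v => rnk.getD v 0) with hwins0
  have hw0len : wins0.length = friends.length := by rw [hwins0, List.length_map, hlvlen]
  have hsolB : solution_alt friends gifts =
      PySem.List.maxD (corrB lv GB.1.items wins0) (fun x => x) 0 := rfl
  have hwins_at : ∀ kn : ℕ, kn < friends.length →
      PySem.List.pyGetD (corrB lv GB.1.items wins0) (kn : Int) 0 =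
      ((PySem.List.pyRange 0 (friends.length : Int) 1).countP
        (fun j => pvP friends GA.1 GA.2 (kn : Int) j) : Int) := by
    intro kn hkn
    have hknlv : kn < lv.length := by rw [hlvlen]; exact hkn
    have hvk : PySem.List.pyGetD lv (kn : Int) 0 = lv[kn] := by
      rw [PySem.List.pyGetD_natCast]; exact List.getD_eq_getElem lv 0 hknlv
    set v := lv[kn] with hveq
    have hb : ∀ q ∈ GB.1.items, 0 ≤ q.1.1 ∧ q.1.1 < q.1.2 ∧ q.1.2 < (wins0.length : Int) := by
      intro q hq
      have hbd := hkb q.1 (PySem.Dict.mem_keys_of_mem_items GB.1 hq)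
      rw [hw0len]
      exact hbd
    rw [corrB_getD lv GB.1.items wins0 hb (kn : Int) (by positivity)]
    -- base value from the rank dict
    have h0 : PySem.List.pyGetD wins0 (kn : Int) 0 = rnk.getD v 0 := by
      rw [hwins0]; exact pyGetD_map_nat lv _ kn hknlv
    have hvmem : v ∈ lv := List.getElem_mem hknlv
    have hsortmem : v ∈ PySem.List.sorted lv (fun x => x) false :=
      (PySem.List.mem_sorted lv _ false _).mpr hvmem
    have hrank : rnk.getD v 0 =
        ((PySem.List.sorted lv (fun x => x) false).idxOf v : Int) := by
      rw [hrnk]; exact rank_getD _ _ hsortmem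
    have hpair : (PySem.List.sorted lv (fun x => x) false).Pairwise (· ≤ ·) := by
      simpa using PySem.List.sorted_pairwise lv (fun x => x)
    have hidx := idxOf_sorted _ hpair _ hsortmem
    have hcntperm : (PySem.List.sorted lv (fun x => x) false).countP
        (fun x => decide (x < v)) = lv.countP (fun x => decide (x < v)) :=
      (PySem.List.sorted_perm lv _ false).countP_eq _
    have hlvmap : (PySem.List.pyRange 0 (friends.length : Int) 1).map
        (fun j => PySem.List.pyGetD lv j 0) = lv := by
      have e := PySem.List.map_pyGetD_pyRange_zero' lv 0
      rw [hlvlen] at e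
      exact e
    have hcnt2 : lv.countP (fun x => decide (x < v)) =
        (PySem.List.pyRange 0 (friends.length : Int) 1).countP
          (fun j => decide (PySem.List.pyGetD lv j 0 < v)) := by
      conv_lhs => rw [← hlvmap]
      rw [List.countP_map]
      rfl
    -- corrections
    have hsum := sum_C_eq friends.length GA.1 GB.1 lv ⟨hg1, hg2, hkb, hnd, hrel⟩ (kn : Int)
      ⟨by positivity, by exact_mod_cast hkn⟩
    have hδ0 := sum_map_sub_int (PySem.List.pyRange 0 (friends.length : Int) 1)
      (fun j => if pvQ GA.1 lv (kn : Int) j then (1 : Int) else 0)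
      (fun j => if PySem.List.pyGetD lv j 0 < PySem.List.pyGetD lv (kn : Int) 0
        then (1 : Int) else 0)
    have hδ1 : ((PySem.List.pyRange 0 (friends.length : Int) 1).map
        (pvδ GA.1 lv (kn : Int))).sum =
        ((PySem.List.pyRange 0 (friends.length : Int) 1).map
          (fun j => if pvQ GA.1 lv (kn : Int) j then (1 : Int) else 0)).sum -
        ((PySem.List.pyRange 0 (friends.length : Int) 1).map
          (fun j => if PySem.List.pyGetD lv j 0 < PySem.List.pyGetD lv (kn : Int) 0
            then (1 : Int) else 0)).sum := hδ0
    have hcQ := PySem.List.sum_map_ite_one_zero (pvQ GA.1 lv (kn : Int))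
      (PySem.List.pyRange 0 (friends.length : Int) 1)
    have hcL := PySem.List.sum_map_ite_one_zero
      (fun j => decide (PySem.List.pyGetD lv j 0 < PySem.List.pyGetD lv (kn : Int) 0))
      (PySem.List.pyRange 0 (friends.length : Int) 1)
    simp only [decide_eq_true_eq] at hcL
    -- P = Q on the range
    have hPQ : ∀ j ∈ PySem.List.pyRange 0 (friends.length : Int) 1,
        pvP friends GA.1 GA.2 (kn : Int) j = pvQ GA.1 lv (kn : Int) j := by
      intro j hj
      obtain ⟨hj0, hjn⟩ := PySem.List.mem_pyRange_one.mp hj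
      lift j to ℕ using hj0 with jn
      have hjn' : jn < friends.length := by exact_mod_cast hjn
      have e1 := lv_bridge friends GB.2 kn hkn
      have e2 := lv_bridge friends GB.2 jn hjn'
      unfold pvP pvQ
      rw [hlvl, ← e1, ← e2]
    have hcong : (PySem.List.pyRange 0 (friends.length : Int) 1).countP
        (fun j => pvP friends GA.1 GA.2 (kn : Int) j) =
        (PySem.List.pyRange 0 (friends.length : Int) 1).countP
          (fun j => pvQ GA.1 lv (kn : Int) j) :=
      List.countP_congr (fun x hx => by rw [hPQ x hx])
    rw [h0, hrank, hidx, hsum, hδ1, hcQ, hcL, hcong]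
    rw [hvk, hcntperm, hcnt2]
    ring
  have hlist : corrB lv GB.1.items wins0 = (List.range friends.length).map (fun kn : ℕ =>
      ((PySem.List.pyRange 0 (friends.length : Int) 1).countP
        (fun j => pvP friends GA.1 GA.2 (kn : Int) j) : Int)) := by
    apply List.ext_getElem
    · rw [corrB_length, hw0len, List.length_map, List.length_range]
    · intro i h1 h2
      rw [List.getElem_map, List.getElem_range]
      have hi : i < friends.length := by rwa [corrB_length, hw0len] at h1
      have hv := hwins_at i hi
      rw [← hv, PySem.List.pyGetD_natCast]
      exact (List.getD_eq_getElem _ 0 h1).symm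
  have hnn : ∀ x ∈ corrB lv GB.1.items wins0, 0 ≤ x := by
    rw [hlist]
    intro x hx
    obtain ⟨kn, _, rfl⟩ := List.mem_map.mp hx
    positivity
  rw [hsolA, hsolB, countA_eq, maxD_nonneg _ hnn, hlist]

-- ===== VERDICT (by name: the statement is the Claim_ definition above) =====
theorem solution_spec : Claim_equal_solution := by
  intro friends gifts _ hpre
  exact main_eq friends gifts hpre
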